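-- pv_equiv track=rewrite | github.com/ArchonMegalon/fleet | scripts/materialize_support_case_packets.py | _is_auth_refresh_error
-- ===== SOURCE A (Python) =====
-- def _is_auth_refresh_error(message: str) -> bool:
--     raw = str(message or "").strip().lower()
--     if not raw:
--         return False
--     markers = (
--         "http error 401",
--         "http error 403",
--         "unauthorized",
--         "forbidden",
--         "auth_required",
--         "authorization is required",
--     )
--     return any(marker in raw for marker in markers)
-- ===== SOURCE B (Python) =====
-- def _is_auth_refresh_error(message: str) -> bool:
--     raw = str(message or "").strip().lower()
--     markers = (
--         "http error 401",
--         "http error 403",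
--         "unauthorized",
--         "forbidden",
--         "auth_required",
--         "authorization is required",
--     )
--     # single left-to-right pass: at each position, test whether some marker starts here
--     for i in range(len(raw)):
--         if any(raw.startswith(m, i) for m in markers):
--             return True
--     return False
-- ===== Notes on version B (the rewrite author's own statement) =====
-- stated objective: alternative
-- what changed: Replaces the six independent substring-containment searches with a single left-to-right scan over the normalized text that tests at each position whether any marker starts there.
import Mathlib
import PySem

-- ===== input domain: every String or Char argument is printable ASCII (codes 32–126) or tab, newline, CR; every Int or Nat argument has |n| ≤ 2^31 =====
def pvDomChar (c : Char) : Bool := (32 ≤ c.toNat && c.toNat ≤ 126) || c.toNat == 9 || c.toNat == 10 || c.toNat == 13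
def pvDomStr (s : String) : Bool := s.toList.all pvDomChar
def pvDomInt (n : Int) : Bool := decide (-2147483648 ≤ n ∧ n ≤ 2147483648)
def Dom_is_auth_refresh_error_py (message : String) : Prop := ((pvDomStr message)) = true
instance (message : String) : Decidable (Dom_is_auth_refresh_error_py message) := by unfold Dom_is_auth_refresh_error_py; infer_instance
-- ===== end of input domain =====

-- B replaces the six per-marker substring searches with one left-to-right scan testing each position for a marker prefix (alternative, same cost).


-- ===== PORT A =====
def pvMarkersA : List String :=
  ["http error 401", "http error 403", "unauthorized", "forbidden",
   "auth_required", "authorization is required"]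

def is_auth_refresh_error_py (message : String) : Bool :=
  let raw := PySem.Str.lower (PySem.Str.strip (if message == "" then "" else message))
  if raw == "" then false
  else pvMarkersA.any (fun marker => PySem.Str.isIn marker raw)

-- ===== PORT B =====
def pvMarkersB : List String :=
  ["http error 401", "http error 403", "unauthorized", "forbidden",
   "auth_required", "authorization is required"]

-- the 'while text:' loop of Source B: the position loop of Source B, as structural recursion over the remaining suffix of the text
def pvScanB (text : List Char) : Bool :=
  match text with
  | [] => false
  | c :: rest =>
    if pvMarkersB.any (fun m => PySem.Chars.startswith (c :: rest) m.toList) then true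
    else pvScanB rest

def is_auth_refresh_error_py_alt (message : String) : Bool :=
  let raw := PySem.Str.lower (PySem.Str.strip (if message == "" then "" else message))
  pvScanB raw.toList

-- ===== PRECONDITION & SPEC =====
def Spec_is_auth_refresh_error_py (message : String) (out : Bool) : Prop := out = is_auth_refresh_error_py_alt message
instance (message : String) (out : Bool) : Decidable (Spec_is_auth_refresh_error_py message out) := by unfold Spec_is_auth_refresh_error_py; infer_instance

-- ===== CLAIM (what is proved, stated in full; the proofs are below) =====
def Claim_equal_is_auth_refresh_error_py : Prop := ∀ (message : String), Dom_is_auth_refresh_error_py message → Spec_is_auth_refresh_error_py message (is_auth_refresh_error_py message)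

-- ===== LEMMAS AND PROOFS =====

lemma pvScanB_iff (l : List Char) :
    pvScanB l = true ↔ ∃ m ∈ pvMarkersB, m.toList <:+: l := by
  induction l with
  | nil =>
    simp only [pvScanB, List.infix_nil]
    constructor
    · intro h; cases h
    · rintro ⟨m, hm, hnil⟩
      revert hnil
      fin_cases hm <;> decide
  | cons c rest ih =>
    simp only [pvScanB]
    split_ifs with h
    · simp only [true_iff]
      rcases List.any_eq_true.mp h with ⟨m, hm, hpre⟩
      exact ⟨m, hm, ((PySem.Chars.startswith_iff _ _).mp hpre).isInfix⟩
    · rw [ih]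
      constructor
      · rintro ⟨m, hm, hinf⟩; exact ⟨m, hm, hinf.trans (List.suffix_cons c rest).isInfix⟩
      · rintro ⟨m, hm, hinf⟩
        rcases (List.infix_cons_iff).mp hinf with hpre | hinf'
        · exact absurd (List.any_eq_true.mpr ⟨m, hm, (PySem.Chars.startswith_iff _ _).mpr hpre⟩) h
        · exact ⟨m, hm, hinf'⟩

lemma pvScanB_eq_any (l : List Char) :
    pvScanB l = pvMarkersB.any (fun m => PySem.Chars.isIn m.toList l) := by
  rw [Bool.eq_iff_iff, pvScanB_iff, List.any_eq_true]
  constructor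
  · rintro ⟨m, hm, hinf⟩; exact ⟨m, hm, (PySem.Chars.isIn_iff_infix _ _).mpr hinf⟩
  · rintro ⟨m, hm, h⟩; exact ⟨m, hm, (PySem.Chars.isIn_iff_infix _ _).mp h⟩

-- ===== VERDICT (by name: the statement is the Claim_ definition above) =====
theorem is_auth_refresh_error_py_spec : Claim_equal_is_auth_refresh_error_py := by
  intro message _
  unfold Spec_is_auth_refresh_error_py is_auth_refresh_error_py is_auth_refresh_error_py_alt
  dsimp only
  generalize PySem.Str.lower (PySem.Str.strip (if (message == "") = true then "" else message)) = raw
  rw [pvScanB_eq_any]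
  by_cases h : raw = ""
  · subst h; decide
  · rw [if_neg (by simp [h])]
    simp only [pvMarkersA, pvMarkersB, List.any_cons, List.any_nil, PySem.Str.isIn_eq]
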